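-- pv_equiv track=rewrite | github.com/albertquiroga/awesome-ios-game-ports | main.py | extract_genre_from_api
-- ===== SOURCE A (Python) =====
-- def extract_genre_from_api(result: dict) -> str:
--     """
--     Extract genre from iTunes API response.
--     The first genre is always "Games", so we skip it and look for the next meaningful genre.
--     We also skip generic genres like "Board", "Family", and "Entertainment" to find more specific ones.
--     :param result: iTunes API result dictionary
--     :return: Genre string
--     """
--     genres = result.get('genres', [])
--
--     # Genres to skip as they're too generic
--     generic_genres = {'Games', 'Board', 'Family', 'Entertainment', 'Casual'}
--
--     # Find the first genre that's not in our skip list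
--     for genre in genres:
--         if genre not in generic_genres:
--             return genre
--
--     # If all genres are generic, return the last non-"Games" genre or fallback
--     for genre in reversed(genres):
--         if genre != 'Games':
--             return genre
--
--     return 'Unknown'
-- ===== SOURCE B (Python) =====
-- def extract_genre_from_api(result: dict) -> str:
--     genres = result.get('genres', [])
--     generic_genres = {'Games', 'Board', 'Family', 'Entertainment', 'Casual'}
--     first_non_generic = None
--     last_non_games = None
--     for genre in genres:
--         if first_non_generic is None and genre not in generic_genres:
--             first_non_generic = genre
--         if genre != 'Games':
--             last_non_games = genre
--     if first_non_generic is not None: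
--         return first_non_generic
--     if last_non_games is not None:
--         return last_non_games
--     return 'Unknown'
-- ===== Notes on version B (the rewrite author's own statement) =====
-- stated objective: alternative
-- what changed: Replaced A's two sequential scans (forward find of a non-generic genre, then a scan of reversed(genres) for a non-'Games' genre) with a single forward pass maintaining two None-sentinel accumulators (first non-generic genre, last non-'Games' genre) merged after the loop.
import Mathlib
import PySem

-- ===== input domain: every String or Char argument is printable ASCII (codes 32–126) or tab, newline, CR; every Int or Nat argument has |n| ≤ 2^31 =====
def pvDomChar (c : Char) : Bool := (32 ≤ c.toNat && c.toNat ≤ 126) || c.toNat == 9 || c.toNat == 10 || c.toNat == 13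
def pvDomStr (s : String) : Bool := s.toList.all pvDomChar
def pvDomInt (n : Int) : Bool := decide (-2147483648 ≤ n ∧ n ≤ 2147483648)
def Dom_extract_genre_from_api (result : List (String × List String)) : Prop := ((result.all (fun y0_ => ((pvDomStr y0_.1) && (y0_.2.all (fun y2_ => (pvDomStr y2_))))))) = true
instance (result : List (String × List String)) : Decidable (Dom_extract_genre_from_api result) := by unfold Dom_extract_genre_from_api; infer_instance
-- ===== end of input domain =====

-- B replaces A's two sequential scans (forward, then over reversed(genres)) with one
-- forward pass keeping two Option accumulators, merged after the loop (alternative, same cost).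

-- ===== PORT A =====
-- the literal set {'Games','Board','Family','Entertainment','Casual'}
def pvGeneric : List String := ["Games", "Board", "Family", "Entertainment", "Casual"]

-- first for-loop: return the first genre not in generic_genres (none = fell through)
def pvLoop1 : List String → Option String
  | [] => none
  | g :: gs => if g ∈ pvGeneric then pvLoop1 gs else some g

-- second for-loop over reversed(genres): first genre ≠ 'Games' (none = fell through)
def pvLoop2 : List String → Option String
  | [] => none
  | g :: gs => if g ≠ "Games" then some g else pvLoop2 gs

def extract_genre_from_api (result : List (String × List String)) : String :=
  let genres := (PySem.Dict.mk result).getD "genres" []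
  match pvLoop1 genres with
  | some g => g
  | none =>
    match pvLoop2 genres.reverse with
    | some g => g
    | none => "Unknown"

-- ===== PORT B =====
-- single pass: state = (first_non_generic, last_non_games), both None-sentinels
def pvStep (st : Option String × Option String) (g : String) : Option String × Option String :=
  ((if st.1 = none ∧ g ∉ pvGeneric then some g else st.1),
   (if g ≠ "Games" then some g else st.2))

def extract_genre_from_api_alt (result : List (String × List String)) : String :=
  let genres := (PySem.Dict.mk result).getD "genres" []
  let st := genres.foldl pvStep (none, none)
  match st.1 with
  | some g => g
  | none =>
    match st.2 with
    | some g => g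
    | none => "Unknown"

-- ===== PRECONDITION & SPEC =====
def Spec_extract_genre_from_api (result : List (String × List String)) (out : String) : Prop := out = extract_genre_from_api_alt result
instance (result : List (String × List String)) (out : String) : Decidable (Spec_extract_genre_from_api result out) := by unfold Spec_extract_genre_from_api; infer_instance

-- ===== CLAIM (what is proved, stated in full; the proofs are below) =====
def Claim_equal_extract_genre_from_api : Prop := ∀ (result : List (String × List String)), Dom_extract_genre_from_api result → Spec_extract_genre_from_api result (extract_genre_from_api result)

-- ===== LEMMAS AND PROOFS =====

-- first component of the fold: the accumulated first-non-generic, never overwritten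
theorem pvFold_fst (gs : List String) (f l : Option String) :
    (gs.foldl pvStep (f, l)).1 = (f.orElse (fun _ => pvLoop1 gs)) := by
  induction gs generalizing f l with
  | nil => cases f <;> simp [pvLoop1]
  | cons g gs ih =>
    simp only [List.foldl_cons, pvStep, pvLoop1]
    cases f with
    | none => by_cases h : g ∈ pvGeneric <;> simp [h, ih]
    | some x => simp [ih]

-- second component: the last non-'Games' genre of gs, else the accumulator
theorem pvFold_snd (gs : List String) (f l : Option String) :
    (gs.foldl pvStep (f, l)).2 = ((pvLoop2 gs.reverse).orElse (fun _ => l)) := by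
  induction gs generalizing f l with
  | nil => cases l <;> simp [pvLoop2]
  | cons g gs ih =>
    simp only [List.foldl_cons, List.reverse_cons]
    rw [ih]
    by_cases h : g = "Games"
    · subst h
      have : pvLoop2 (gs.reverse ++ ["Games"]) = (pvLoop2 gs.reverse).orElse (fun _ => none) := by
        induction gs.reverse with
        | nil => simp [pvLoop2]
        | cons a as ih2 =>
          simp only [List.cons_append, pvLoop2]
          by_cases ha : a = "Games" <;> simp [ha, ih2]
      simp [this, pvStep]
    · have : pvLoop2 (gs.reverse ++ [g]) = (pvLoop2 gs.reverse).orElse (fun _ => some g) := by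
        induction gs.reverse with
        | nil => simp [pvLoop2, h]
        | cons a as ih2 =>
          simp only [List.cons_append, pvLoop2]
          by_cases ha : a = "Games" <;> simp [ha, ih2]
      simp [this, pvStep, h]

-- ===== VERDICT (by name: the statement is the Claim_ definition above) =====
theorem extract_genre_from_api_spec : Claim_equal_extract_genre_from_api := by
  intro result _
  unfold Spec_extract_genre_from_api extract_genre_from_api extract_genre_from_api_alt
  simp only [pvFold_fst, pvFold_snd]
  set gs := (PySem.Dict.mk result).getD "genres" [] with hgs
  cases pvLoop1 gs <;> cases pvLoop2 gs.reverse <;> simp
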